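-- pv_equiv track=rewrite | github.com/mayararysia/ESTD | py_lista02.py | formato
-- ===== SOURCE A (Python) =====
-- def removeEspacosAMais(nome):
--   tam = len(nome)
--   ini=0; final = tam-1
--   nomeFormatado = ""
--
--   while nome[ini]== " ": #remove os espaços da direita
--     ini+=1
--   while nome[final]== " ": #remove os espaços da esquerda
--     final-=1
--   i = ini
--
--   while i <= final:
--     if nome[i] == " ":
--       ant = i-1
--       pos = i+1
--       if nome[pos] == " " and nome[ant]!=" ":
--         nomeFormatado+=nome[i]
--       if(nome[ant]!=" " and nome[pos]!=" "):
--           nomeFormatado+=nome[i]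
--     else: nomeFormatado+=nome[i]
--     i+=1
--
--   return nomeFormatado
--
-- def formato(nome):
--   string = removeEspacosAMais(nome)
--   tam = len(string);
--   i = tam-1; j = 0;
--   nomeFormatado = "";
--
--   while string[i] !=' ':
--     j+=1;
--     i-=1;
--     if i == -1: break
--
--   j = tam - j;
--
--   while j<tam:
--     nomeFormatado+= string[j];
--     j+=1;
--
--   nomeFormatado+='/';
--
--   if i == -1: return nomeFormatado
--   i=0;
--
--   while string[i] !=' ':
--     nomeFormatado+= string[i];
--     i+=1;
--   return nomeFormatado;
-- ===== SOURCE B (Python) =====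
-- def formato(nome):
--     parts = []
--     cur = ""
--     for ch in nome:
--         if ch == ' ':
--             if cur:
--                 parts.append(cur)
--                 cur = ""
--         else:
--             cur += ch
--     if cur:
--         parts.append(cur)
--     last = parts[-1]
--     if len(parts) == 1:
--         return last + '/'
--     return last + '/' + parts[0]
-- ===== Notes on version B (the rewrite author's own statement) =====
-- stated objective: simpler
-- what changed: A makes several index-driven passes (two trimming while-loops, a neighbour-inspecting space-squeeze pass that rebuilds the string char by char, then backward and forward re-scans of the normalized string); B tokenizes the input into words in one forward pass and returns the last word, a slash, and (when there are at least two words) the first word.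
import Mathlib
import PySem

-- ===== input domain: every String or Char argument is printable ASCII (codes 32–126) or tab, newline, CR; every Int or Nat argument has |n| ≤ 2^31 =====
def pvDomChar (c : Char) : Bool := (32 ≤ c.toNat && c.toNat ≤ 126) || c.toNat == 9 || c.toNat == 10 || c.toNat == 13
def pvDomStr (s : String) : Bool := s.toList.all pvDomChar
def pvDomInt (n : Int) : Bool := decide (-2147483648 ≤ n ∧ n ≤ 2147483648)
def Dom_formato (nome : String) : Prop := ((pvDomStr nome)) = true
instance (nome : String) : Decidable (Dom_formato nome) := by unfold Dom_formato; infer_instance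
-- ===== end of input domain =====

-- B replaces A's multi-pass index scanning (two trim loops, a neighbour-inspecting squeeze pass,
-- then backward and forward re-scans) with a single-pass tokenizer that collects the words and
-- reads the last and first one (objective: simpler).

-- ===== PORT A =====
-- the middle while loop of removeEspacosAMais: walks the trimmed chars carrying the previous char
-- (`ant` = nome[i-1]); `pos` = nome[i+1], read via headD (in Python that index is always in range
-- on the inputs Pre_formato admits)
def pvRemLoop : Char → List Char → List Char
  | _, [] => []
  | ant, c :: rest =>
    if c = ' ' then
      (if rest.headD ' ' = ' ' ∧ ant ≠ ' ' then [c] else []) ++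
      (if ant ≠ ' ' ∧ rest.headD ' ' ≠ ' ' then [c] else []) ++ pvRemLoop c rest
    else c :: pvRemLoop c rest

-- the two trimming while loops (`ini`/`final`) become dropWhile from each end; on the inputs where
-- the Python loops run past an end (empty/all-space input, an IndexError) this is outside Pre_formato
def removeEspacosAMais (cs : List Char) : List Char :=
  pvRemLoop ' ' (List.rdropWhile (· == ' ') (cs.dropWhile (· == ' ')))

def formato (nome : String) : String :=
  let s := removeEspacosAMais nome.toList
  -- backward while loop counting the trailing non-space run (j), breaking at i = -1 (i.e. j = tam)
  let j := (s.reverse.takeWhile (fun c => c != ' ')).length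
  -- the copy loop from index tam - j
  let lastPart := s.drop (s.length - j)
  if j = s.length then String.ofList (lastPart ++ ['/'])      -- the i == -1 early return
  else String.ofList (lastPart ++ ['/'] ++ s.takeWhile (fun c => c != ' '))  -- forward loop: the first name

-- ===== PORT B =====
-- the for-loop of Source B: accumulate the current word, flush it on ' '
def pvTok : List Char → List Char → List (List Char)
  | cur, [] => if cur = [] then [] else [cur]
  | cur, c :: rest =>
    if c = ' ' then (if cur = [] then pvTok [] rest else cur :: pvTok [] rest)
    else pvTok (cur ++ [c]) rest

def formato_alt (nome : String) : String :=
  let parts := pvTok [] nome.toList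
  match PySem.List.pyGet? parts (-1) with
  | none => ""                                            -- parts[-1] raises IndexError: outside Pre_formato
  | some last =>
    if parts.length = 1 then String.ofList (last ++ ['/'])
    else String.ofList (last ++ ['/'] ++ parts.headD [])      -- parts[0] (parts is nonempty here)

-- ===== PRECONDITION & SPEC =====
-- Pre_ excludes exactly the inputs with no non-space character (empty or all-space strings), on
-- which Python A raises IndexError (Python B raises IndexError there too).
def Pre_formato (nome : String) : Prop := nome.toList.any (fun c => c != ' ') = true
instance (nome : String) : Decidable (Pre_formato nome) := by unfold Pre_formato; infer_instance
def pvWitness_formato : String := "Ada  Lovelace"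

def Spec_formato (nome : String) (out : String) : Prop := out = formato_alt nome
instance (nome : String) (out : String) : Decidable (Spec_formato nome out) := by unfold Spec_formato; infer_instance

-- ===== CLAIM (what is proved, stated in full; the proofs are below) =====
def Claim_equal_formato : Prop := ∀ (nome : String), Dom_formato nome → Pre_formato nome → Spec_formato nome (formato nome)

-- ===== LEMMAS AND PROOFS =====

-- join a word list with single spaces (the shape removeEspacosAMais produces)
def joinSp : List (List Char) → List Char
  | [] => []
  | [w] => w
  | w :: ws => w ++ ' ' :: joinSp ws

theorem joinSp_cons (w : List Char) (ws : List (List Char)) (h : ws ≠ []) :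
    joinSp (w :: ws) = w ++ ' ' :: joinSp ws := by
  cases ws with
  | nil => exact absurd rfl h
  | cons a t => rfl

theorem remLoop_keep (p : Char) (r : List Char) (hp : p ≠ ' ') :
    pvRemLoop p (' ' :: r) = ' ' :: pvRemLoop ' ' r := by
  by_cases hh : r.head?.getD ' ' = ' ' <;> simp [pvRemLoop, hp, hh]

theorem remLoop_drop (r : List Char) : pvRemLoop ' ' (' ' :: r) = pvRemLoop ' ' r := by
  simp [pvRemLoop]

theorem remLoop_char (p c : Char) (r : List Char) (hc : c ≠ ' ') :
    pvRemLoop p (c :: r) = c :: pvRemLoop c r := by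
  simp [pvRemLoop, hc]

theorem tok_append_space : ∀ (v cur : List Char), pvTok cur (v ++ [' ']) = pvTok cur v := by
  intro v
  induction v with
  | nil => intro cur; by_cases h : cur = [] <;> simp [pvTok, h]
  | cons c r ih =>
    intro cur
    by_cases hc : c = ' '
    · by_cases h : cur = [] <;> simp [pvTok, hc, h, ih]
    · simp [pvTok, hc, ih]

theorem tok_append_spaces : ∀ (u v cur : List Char), (∀ c ∈ u, c = ' ') →
    pvTok cur (v ++ u) = pvTok cur v := by
  intro u
  induction u with
  | nil => simp
  | cons c r ih =>
    intro v cur h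
    have hc : c = ' ' := h c (by simp)
    have hsplit : v ++ c :: r = (v ++ [c]) ++ r := by simp
    rw [hsplit, ih (v ++ [c]) cur (fun x hx => h x (by simp [hx])), hc, tok_append_space]

theorem tok_dropWhile : ∀ (cs : List Char),
    pvTok [] (cs.dropWhile (· == ' ')) = pvTok [] cs := by
  intro cs
  induction cs with
  | nil => rfl
  | cons c r ih =>
    by_cases hc : c = ' '
    · rw [List.dropWhile_cons_of_pos (by simp [hc]), ih]
      simp [pvTok, hc]
    · rw [List.dropWhile_cons_of_neg (by simp [hc])]

theorem tok_ne_nil_of_cur : ∀ (cs cur : List Char), cur ≠ [] → pvTok cur cs ≠ [] := by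
  intro cs
  induction cs with
  | nil => intro cur h; simp [pvTok, h]
  | cons c r ih =>
    intro cur h
    by_cases hc : c = ' '
    · simp [pvTok, hc, h]
    · simp only [pvTok, if_neg hc]
      exact ih (cur ++ [c]) (by simp)

theorem tok_ne_nil : ∀ (cs cur : List Char), (∃ c ∈ cs, c ≠ ' ') → pvTok cur cs ≠ [] := by
  intro cs
  induction cs with
  | nil => intro cur h; obtain ⟨c, hc, _⟩ := h; simp at hc
  | cons c r ih =>
    intro cur h
    by_cases hc : c = ' '
    · have hr : ∃ x ∈ r, x ≠ ' ' := by
        obtain ⟨x, hx, hxs⟩ := h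
        rcases List.mem_cons.mp hx with h1 | h1
        · exact absurd (h1.trans hc) hxs
        · exact ⟨x, h1, hxs⟩
      by_cases hcur : cur = [] <;> simp [pvTok, hc, hcur, ih [] hr]
    · simp only [pvTok, if_neg hc]
      exact tok_ne_nil_of_cur r (cur ++ [c]) (by simp)

theorem tok_words : ∀ (cs cur : List Char), (∀ ch ∈ cur, ch ≠ ' ') →
    ∀ w ∈ pvTok cur cs, w ≠ [] ∧ ∀ ch ∈ w, ch ≠ ' ' := by
  intro cs
  induction cs with
  | nil =>
    intro cur h w hw
    by_cases hcur : cur = []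
    · simp [pvTok, hcur] at hw
    · simp [pvTok, hcur] at hw
      subst hw; exact ⟨hcur, h⟩
  | cons c r ih =>
    intro cur h w hw
    by_cases hc : c = ' '
    · by_cases hcur : cur = []
      · simp only [pvTok, if_pos hc, if_pos hcur] at hw
        exact ih [] (by simp) w hw
      · simp only [pvTok, if_pos hc, if_neg hcur] at hw
        rcases List.mem_cons.mp hw with h1 | h1
        · subst h1; exact ⟨hcur, h⟩
        · exact ih [] (by simp) w h1
    · simp only [pvTok, if_neg hc] at hw
      refine ih (cur ++ [c]) ?_ w hw
      intro ch hch
      rcases List.mem_append.mp hch with h1 | h1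
      · exact h ch h1
      · simp at h1; subst h1; exact hc

-- the heart of the equivalence: A's squeeze loop produces B's words joined by single spaces
theorem remtok : ∀ (rest : List Char), rest.getLast? ≠ some ' ' →
    (pvRemLoop ' ' rest = joinSp (pvTok [] rest)) ∧
    (∀ cur p, cur ≠ [] → p ≠ ' ' → joinSp (pvTok cur rest) = cur ++ pvRemLoop p rest) := by
  intro rest
  induction rest with
  | nil =>
    intro _
    refine ⟨by simp [pvRemLoop, pvTok, joinSp], ?_⟩
    intro cur p hcur _
    simp [pvTok, pvRemLoop, hcur, joinSp]
  | cons c r ih =>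
    intro hlast
    have hlr : r.getLast? ≠ some ' ' := by
      cases r with
      | nil => simp
      | cons b t => rwa [List.getLast?_cons_cons] at hlast
    have ih' := ih hlr
    by_cases hc : c = ' '
    · subst hc
      have hrne : r ≠ [] := by
        intro h; subst h; simp at hlast
      have hrns : ∃ x ∈ r, x ≠ ' ' := by
        refine ⟨r.getLast hrne, List.getLast_mem hrne, ?_⟩
        intro h
        exact hlr (by rw [List.getLast?_eq_some_getLast hrne, h])
      have htok : pvTok [] r ≠ [] := tok_ne_nil r [] hrns
      constructor
      · rw [remLoop_drop, ih'.1]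
        simp [pvTok]
      · intro cur p hcur hp
        have hstep : pvTok cur (' ' :: r) = cur :: pvTok [] r := by simp [pvTok, hcur]
        rw [hstep, joinSp_cons cur _ htok, remLoop_keep p r hp, ih'.1]
    · constructor
      · rw [remLoop_char ' ' c r hc]
        have hstep : pvTok [] (c :: r) = pvTok [c] r := by simp [pvTok, hc]
        rw [hstep, ih'.2 [c] c (by simp) hc]
        simp
      · intro cur p hcur hp
        have hstep : pvTok cur (c :: r) = pvTok (cur ++ [c]) r := by simp [pvTok, hc]
        rw [hstep, ih'.2 (cur ++ [c]) c (by simp) hc, remLoop_char p c r hc]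
        simp

theorem joinSp_rev_takeWhile : ∀ (ws : List (List Char)) (lw : List Char),
    (∀ w ∈ ws, ∀ c ∈ w, c ≠ ' ') → ws.getLast? = some lw →
    (joinSp ws).reverse.takeWhile (fun c => c != ' ') = lw.reverse := by
  intro ws
  induction ws with
  | nil => intro lw _ h; simp at h
  | cons w t ih =>
    intro lw hws hl
    cases t with
    | nil =>
      simp at hl; subst hl
      have hw : ∀ c ∈ w.reverse, (fun c => c != ' ') c = true := by
        intro c hc; simpa using hws w (by simp) c (List.mem_reverse.mp hc)
      simp [joinSp, List.takeWhile_eq_self_iff.mpr hw]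
    | cons b t' =>
      rw [List.getLast?_cons_cons] at hl
      have ihr := ih lw (fun x hx => hws x (by simp [hx])) hl
      rw [joinSp_cons w (b :: t') (by simp)]
      rw [show (w ++ ' ' :: joinSp (b :: t')).reverse
            = (joinSp (b :: t')).reverse ++ (' ' :: w.reverse) by simp]
      rw [List.takeWhile_append]
      split
      · next hlen =>
        have heq : (joinSp (b :: t')).reverse.takeWhile (fun c => c != ' ')
            = (joinSp (b :: t')).reverse :=
          (List.takeWhile_prefix _).eq_of_length hlen
        rw [List.takeWhile_cons_of_neg (by simp)]
        rw [← heq, ihr]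
        simp
      · next hlen => exact ihr

theorem joinSp_len_le : ∀ (ws : List (List Char)) (lw : List Char),
    ws.getLast? = some lw → lw.length ≤ (joinSp ws).length := by
  intro ws
  induction ws with
  | nil => intro lw h; simp at h
  | cons w t ih =>
    intro lw hl
    cases t with
    | nil => simp at hl; subst hl; simp [joinSp]
    | cons b t' =>
      rw [List.getLast?_cons_cons] at hl
      rw [joinSp_cons w (b :: t') (by simp)]
      have := ih lw hl
      simp only [List.length_append, List.length_cons]
      omega

theorem joinSp_takeWhile_head : ∀ (w : List Char) (ws : List (List Char)),
    (∀ c ∈ w, c ≠ ' ') → (joinSp (w :: ws)).takeWhile (fun c => c != ' ') = w := by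
  intro w ws hw
  have hself : w.takeWhile (fun c => c != ' ') = w :=
    List.takeWhile_eq_self_iff.mpr (by intro x hx; simpa using hw x hx)
  cases ws with
  | nil => simpa [joinSp] using hself
  | cons b t =>
    rw [joinSp_cons w (b :: t) (by simp), List.takeWhile_append]
    rw [hself]
    simp

theorem pyGet?_neg_one {α : Type} (xs : List α) (h : xs ≠ []) :
    PySem.List.pyGet? xs (-1) = xs.getLast? := by
  have h1 : 1 ≤ xs.length := List.length_pos_iff.mpr h
  simp [PySem.List.pyGet?, PySem.List.pyIdx?, h1, List.getLast?_eq_getElem?]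

-- drop (len - j) recovers the trailing run found by takeWhile on the reverse
theorem drop_of_rev_takeWhile (s pre : List Char) (p : Char → Bool)
    (h : s.reverse.takeWhile p = pre) : s.drop (s.length - pre.length) = pre.reverse := by
  have hpre : pre <+: s.reverse := h ▸ List.takeWhile_prefix p
  have htake : pre = s.reverse.take pre.length := List.prefix_iff_eq_take.mp hpre
  have := List.take_reverse (xs := s) (i := pre.length)
  rw [← htake] at this
  calc s.drop (s.length - pre.length) = (s.drop (s.length - pre.length)).reverse.reverse := by simp
    _ = pre.reverse := by rw [← this]

-- ===== VERDICT (by name: the statement is the Claim_ definition above) =====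
theorem formato_spec : Claim_equal_formato := by
  intro nome _dom hpre
  unfold Spec_formato
  have hex : ∃ c ∈ nome.toList, c ≠ ' ' := by
    unfold Pre_formato at hpre
    simpa using hpre
  set cs := nome.toList with hcs
  set d := cs.dropWhile (· == ' ') with hd
  set t := List.rdropWhile (· == ' ') d with ht
  -- the non-space char survives both trims
  have hcd : ∃ c ∈ d, c ≠ ' ' := by
    obtain ⟨c, hc, hne⟩ := hex
    refine ⟨c, ?_, hne⟩
    have hsplit := List.takeWhile_append_dropWhile (p := (· == ' ')) (l := cs)
    rw [← hsplit] at hc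
    rcases List.mem_append.mp hc with h1 | h1
    · exact absurd (by simpa using List.mem_takeWhile_imp h1) hne
    · exact h1
  have htne : t ≠ [] := by
    rw [ht, Ne, List.rdropWhile_eq_nil_iff]
    push Not
    obtain ⟨c, hc, hne⟩ := hcd
    exact ⟨c, hc, by simpa using hne⟩
  have htlast : t.getLast htne ≠ ' ' := by
    have := List.rdropWhile_last_not (· == ' ') d (ht ▸ htne)
    simpa [← ht] using this
  have htlast? : t.getLast? ≠ some ' ' := by
    rw [List.getLast?_eq_some_getLast htne]
    simpa using htlast
  have htx : ∃ c ∈ t, c ≠ ' ' := ⟨t.getLast htne, List.getLast_mem htne, htlast⟩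
  -- B's words of the raw input = words of the trimmed input
  have hdecomp : ∃ u, d = t ++ u ∧ ∀ c ∈ u, c = ' ' := by
    refine ⟨(d.reverse.takeWhile (· == ' ')).reverse, ?_, ?_⟩
    · conv_lhs => rw [← d.reverse_reverse, ← List.takeWhile_append_dropWhile (p := (· == ' ')) (l := d.reverse)]
      rw [List.reverse_append, ht, List.rdropWhile]
    · intro c hc
      have := List.mem_takeWhile_imp (List.mem_reverse.mp hc)
      simpa using this
  have hwords : pvTok [] cs = pvTok [] t := by
    obtain ⟨u, hu, hus⟩ := hdecomp
    rw [← tok_dropWhile cs, ← hd, hu, tok_append_spaces u t [] hus]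
  set ws := pvTok [] t with hws
  have hwsne : ws ≠ [] := tok_ne_nil t [] htx
  have hgood : ∀ w ∈ ws, w ≠ [] ∧ ∀ ch ∈ w, ch ≠ ' ' := tok_words t [] (by simp)
  have hgoodsp : ∀ w ∈ ws, ∀ c ∈ w, c ≠ ' ' := fun w hw => (hgood w hw).2
  have hsj : pvRemLoop ' ' t = joinSp ws := (remtok t htlast?).1
  obtain ⟨w, t', hwt⟩ : ∃ w t', ws = w :: t' := by
    cases hws' : ws with
    | nil => exact absurd hws' hwsne
    | cons a b => exact ⟨a, b, rfl⟩
  simp only [formato, formato_alt, removeEspacosAMais, ← hcs, ← hd, ← ht, hsj, hwords]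
  cases ht' : t' with
  | nil =>
    -- single word
    subst ht'
    rw [hwt]
    have hwsp : ∀ c ∈ w, c ≠ ' ' := hgoodsp w (hwt ▸ List.mem_cons_self)
    have hself : List.takeWhile (fun c => c != ' ') w.reverse = w.reverse :=
      List.takeWhile_eq_self_iff.mpr (fun x hx => by simpa using hwsp x (List.mem_reverse.mp hx))
    rw [pyGet?_neg_one _ (by simp)]
    simp [joinSp, hself]
  | cons b tb =>
    -- at least two words
    have htbne : t' ≠ [] := by simp [ht']
    obtain ⟨lw, hlw⟩ : ∃ lw, ws.getLast? = some lw := by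
      rw [List.getLast?_eq_some_getLast hwsne]; exact ⟨_, rfl⟩
    have hrev : (joinSp ws).reverse.takeWhile (fun c => c != ' ') = lw.reverse :=
      joinSp_rev_takeWhile ws lw hgoodsp hlw
    have hlt : lw.length < (joinSp ws).length := by
      have hl2 : t'.getLast? = some lw := by
        rw [hwt, ht', List.getLast?_cons_cons] at hlw
        rw [ht']
        exact hlw
      have := joinSp_len_le t' lw hl2
      rw [hwt, joinSp_cons w t' htbne]
      simp only [List.length_append, List.length_cons]
      omega
    have hdropped : (joinSp ws).drop ((joinSp ws).length - lw.length) = lw := by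
      have := drop_of_rev_takeWhile (joinSp ws) lw.reverse (fun c => c != ' ')
        (by rw [hrev])
      simpa using this
    have hhead : (joinSp ws).takeWhile (fun c => c != ' ') = w := by
      rw [hwt]
      exact joinSp_takeWhile_head w t' (hgoodsp w (hwt ▸ List.mem_cons_self))
    rw [pyGet?_neg_one _ (hwt ▸ (by simp : (w :: t') ≠ []))]
    rw [hlw, hrev, List.length_reverse, if_neg (by omega), hdropped, hhead]
    simp [hwt, ht']
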